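-- pv_equiv track=rewrite | github.com/zzx060827/dsa2025 | openjudge/29360/2400010604.py | find_min_original_length
-- ===== SOURCE A (Python) =====
-- def can_form_sticks(sticks, target, used, start, current_length, num_sticks):
--     if num_sticks == 0:
--         return True
--     if current_length == target:
--         return can_form_sticks(sticks, target, used, 0, 0, num_sticks - 1)
--
--     for i in range(start, len(sticks)):
--         if not used[i] and current_length + sticks[i] <= target:
--             used[i] = True
--             if can_form_sticks(sticks, target, used, i + 1, current_length + sticks[i], num_sticks):
--                 return True
--             used[i] = False
--             while i + 1 < len(sticks) and sticks[i] == sticks[i + 1]: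
--                 i += 1
--     return False
--
-- def find_min_original_length(sticks):
--     total_length = sum(sticks)
--     max_stick = max(sticks)
--     sticks.sort(reverse=True)
--
--     for length in range(max_stick, total_length + 1):
--         if total_length % length == 0:
--             num_sticks = total_length // length
--             used = [False] * len(sticks)
--             if can_form_sticks(sticks, length, used, 0, 0, num_sticks):
--                 return length
--     return -1
-- ===== SOURCE B (Python) =====
-- def can_pack(rem, target, num):
--     """Can the sticks in rem be grouped into num groups, building each group
--     left to right with running sum <= target and closing it exactly at target?"""
--     if num == 0:
--         return True
--     return grow([], rem, 0, target, num - 1)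
--
--
-- def grow(skipped, rest, cur, target, more):
--     # more = number of groups still to fill after the current one
--     if cur == target:
--         return can_pack(skipped + rest, target, more)
--     if not rest:
--         return False
--     x, rest2 = rest[0], rest[1:]
--     if cur + x <= target and grow(skipped, rest2, cur + x, target, more):
--         return True
--     return grow(skipped + [x], rest2, cur, target, more)
--
--
-- def find_min_original_length(sticks):
--     total = sum(sticks)
--     lo = max(sticks)
--     sticks.sort(reverse=True)
--     for length in range(lo, total + 1):
--         if total % length == 0 and can_pack(sticks, length, total // length):
--             return length
--     return -1
-- ===== Notes on version B (the rewrite author's own statement) =====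
-- stated objective: simpler
-- what changed: The used-array/index backtracking helper (boolean mask, start index, dead duplicate-skip while loop) is replaced by pure recursion on a (skipped, rest) pair of lists that threads the still-available sticks directly; the candidate-length loop is kept.
-- outside the precondition, e.g. on find_min_original_length([]): A raises ValueError, B raises ValueError; on find_min_original_length([0]): A raises ZeroDivisionError, B raises ZeroDivisionError
import Mathlib
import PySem

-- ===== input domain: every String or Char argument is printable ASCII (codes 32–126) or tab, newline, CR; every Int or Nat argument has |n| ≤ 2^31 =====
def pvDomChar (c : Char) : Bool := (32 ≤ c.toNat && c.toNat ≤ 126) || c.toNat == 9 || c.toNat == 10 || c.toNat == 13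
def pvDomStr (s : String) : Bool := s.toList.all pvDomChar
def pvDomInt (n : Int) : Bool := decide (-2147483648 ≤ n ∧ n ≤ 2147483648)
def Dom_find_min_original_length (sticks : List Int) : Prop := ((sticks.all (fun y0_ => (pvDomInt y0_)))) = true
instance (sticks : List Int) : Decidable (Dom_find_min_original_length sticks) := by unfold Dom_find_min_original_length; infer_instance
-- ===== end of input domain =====

-- B replaces A's used-array/index backtracking with pure recursion on a (skipped, rest) pair of
-- lists — simpler: no boolean mask, no start index, and A's dead duplicate-skip while is gone.
-- Both Pythons sort the argument in place (descending); the equivalence proved here is about the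
-- return value only (B performs the same mutation).

-- ===== PORT A =====
-- In the loop the Python indices i ∈ [start, len) are always in range, so getD is exact there.
-- A's 'while i + 1 < len(sticks) and sticks[i] == sticks[i+1]: i += 1' only rebinds the local
-- loop variable, which Python's 'for' re-assigns on the next iteration: it has no effect on the
-- computation, so it contributes nothing to the port.
def canFormSticks (sticks : List Int) (target : Int) (used : List Bool) (start : Nat) (cur : Int) (num : Nat) : Bool :=
  if num = 0 then true
  else if cur = target then canFormSticks sticks target used 0 0 (num - 1)
  else if _h : start < sticks.length then
    (if used.getD start false = false && decide (cur + sticks.getD start 0 ≤ target) then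
      (canFormSticks sticks target (used.set start true) (start + 1) (cur + sticks.getD start 0) num
        || canFormSticks sticks target used (start + 1) cur num)
    else canFormSticks sticks target used (start + 1) cur num)
  else false
termination_by num * (sticks.length + 1) + (sticks.length - start)
decreasing_by
  all_goals first
  | omega
  | (have h2 : num * (sticks.length + 1) = (num - 1) * (sticks.length + 1) + (sticks.length + 1) := by
       rw [← Nat.succ_mul]; congr 1; omega
     omega)

-- the 'for length in range(max_stick, total_length + 1)' loop with its early 'return length';
-- like Python's lazy range it steps one candidate at a time (materialising the range can
-- be astronomically large even though the loop exits on its first iterations)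
def findLoopA (sticks : List Int) (total : Int) (L : Int) : Int :=
  if L < total + 1 then
    if PySem.Int.mod total L = 0 then
      -- in every run Pre_ admits, total // length ≥ 1 here, so .toNat is exact
      if canFormSticks sticks L (List.replicate sticks.length false) 0 0 (PySem.Int.floordiv total L).toNat
      then L else findLoopA sticks total (L + 1)
    else findLoopA sticks total (L + 1)
  else -1
termination_by (total + 1 - L).toNat
decreasing_by all_goals omega

def find_min_original_length (sticks : List Int) : Int :=
  let total := sticks.sum
  let maxStick := (PySem.List.max? sticks (fun x => x)).getD 0  -- max(sticks); raises on []: excluded by Pre_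
  let sorted := PySem.List.sorted sticks (fun x => x) true
  findLoopA sorted total maxStick

-- ===== PORT B =====
mutual
def canPack (rem : List Int) (target : Int) (num : Nat) : Bool :=
  if num = 0 then true else grow [] rem 0 target (num - 1)
termination_by (2 * num, rem.length)
decreasing_by apply Prod.Lex.left; omega

def grow (skipped rest : List Int) (cur target : Int) (more : Nat) : Bool :=
  if cur = target then canPack (skipped ++ rest) target more
  else match rest with
    | [] => false
    | x :: rest2 =>
      if cur + x ≤ target && grow skipped rest2 (cur + x) target more then true
      else grow (skipped ++ [x]) rest2 cur target more
termination_by (2 * more + 1, rest.length)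
decreasing_by
  · apply Prod.Lex.left; omega
  · apply Prod.Lex.right; simp
  · apply Prod.Lex.right; simp
end

-- B's candidate loop, stepping lazily like Python's range
def findLoopB (sticks : List Int) (total : Int) (L : Int) : Int :=
  if L < total + 1 then
    if PySem.Int.mod total L = 0 && canPack sticks L (PySem.Int.floordiv total L).toNat then L
    else findLoopB sticks total (L + 1)
  else -1
termination_by (total + 1 - L).toNat
decreasing_by all_goals omega

def find_min_original_length_alt (sticks : List Int) : Int :=
  let total := sticks.sum
  let lo := (PySem.List.max? sticks (fun x => x)).getD 0  -- max(sticks); raises on []: excluded by Pre_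
  let sorted := PySem.List.sorted sticks (fun x => x) true
  findLoopB sorted total lo

-- ===== PRECONDITION & SPEC =====
-- Pre_ excludes exactly the inputs where A raises: the empty list (max([]) is a ValueError) and
-- nonempty all-zero lists (the candidate length 0 gives total % 0, a ZeroDivisionError).
def Pre_find_min_original_length (sticks : List Int) : Prop :=
  sticks ≠ [] ∧ sticks.any (fun x => x ≠ 0) = true
instance (sticks : List Int) : Decidable (Pre_find_min_original_length sticks) := by
  unfold Pre_find_min_original_length; infer_instance

def pvWitness_find_min_original_length : List Int := [1, 2, 3]

def Spec_find_min_original_length (sticks : List Int) (out : Int) : Prop := out = find_min_original_length_alt sticks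
instance (sticks : List Int) (out : Int) : Decidable (Spec_find_min_original_length sticks out) := by unfold Spec_find_min_original_length; infer_instance

-- ===== CLAIM (what is proved, stated in full; the proofs are below) =====
def Claim_equal_find_min_original_length : Prop := ∀ (sticks : List Int), Dom_find_min_original_length sticks → Pre_find_min_original_length sticks → Spec_find_min_original_length sticks (find_min_original_length sticks)

-- ===== LEMMAS AND PROOFS =====

-- the sticks with index < k (maskBefore) resp. ≥ k (maskFrom) that are not marked used
def maskBefore : List Int → List Bool → Nat → List Int
  | _, _, 0 => []
  | [], _, _ + 1 => []
  | _ :: _, [], _ + 1 => []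
  | s :: ss, u :: us, k + 1 => (if u then [] else [s]) ++ maskBefore ss us k

def maskFrom : List Int → List Bool → Nat → List Int
  | [], _, _ => []
  | _ :: _, [], _ => []
  | s :: ss, u :: us, 0 => (if u then [] else [s]) ++ maskFrom ss us 0
  | _ :: ss, _ :: us, k + 1 => maskFrom ss us k

theorem maskFrom_zero_split (ss : List Int) (us : List Bool) (k : Nat) :
    maskFrom ss us 0 = maskBefore ss us k ++ maskFrom ss us k := by
  induction ss generalizing us k with
  | nil => cases us <;> cases k <;> simp [maskFrom, maskBefore]
  | cons s ss ih =>
    cases us with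
    | nil => cases k <;> simp [maskFrom, maskBefore]
    | cons u us =>
      cases k with
      | zero => simp [maskFrom, maskBefore]
      | succ k => simp [maskFrom, maskBefore, ih us k]

theorem maskFrom_ge (ss : List Int) (us : List Bool) (k : Nat) (h : ss.length ≤ k) :
    maskFrom ss us k = [] := by
  induction ss generalizing us k with
  | nil => cases us <;> simp [maskFrom]
  | cons s ss ih =>
    cases us with
    | nil => simp [maskFrom]
    | cons u us =>
      cases k with
      | zero => simp at h
      | succ k => simpa [maskFrom] using ih us k (by simpa using h)

theorem maskFrom_lt_false (ss : List Int) (us : List Bool) (k : Nat)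
    (hk : k < ss.length) (hku : k < us.length) (hu : us.getD k false = false) :
    maskFrom ss us k = ss.getD k 0 :: maskFrom ss us (k + 1) := by
  induction ss generalizing us k with
  | nil => simp at hk
  | cons s ss ih =>
    cases us with
    | nil => simp at hku
    | cons u us =>
      cases k with
      | zero =>
        simp at hu
        cases ss with
        | nil => simp [maskFrom, hu]
        | cons s' ss' => cases us <;> simp [maskFrom, hu]
      | succ k =>
        simp at hu hk hku
        simpa [maskFrom] using ih us k (by simpa using hk) (by simpa using hku) (by simpa using hu)

theorem maskFrom_lt_true (ss : List Int) (us : List Bool) (k : Nat)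
    (hu : us.getD k false = true) :
    maskFrom ss us k = maskFrom ss us (k + 1) := by
  induction ss generalizing us k with
  | nil => simp [maskFrom]
  | cons s ss ih =>
    cases us with
    | nil => simp at hu
    | cons u us =>
      cases k with
      | zero =>
        simp at hu
        cases ss with
        | nil => simp [maskFrom, hu]
        | cons s' ss' => cases us <;> simp [maskFrom, hu]
      | succ k =>
        cases ss with
        | nil => simp [maskFrom]
        | cons s' ss' =>
          cases us with
          | nil => simp at hu
          | cons u' us' => simpa [maskFrom] using ih (u' :: us') k (by simpa using hu)

theorem maskBefore_succ_true (ss : List Int) (us : List Bool) (k : Nat)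
    (hu : us.getD k false = true) :
    maskBefore ss us (k + 1) = maskBefore ss us k := by
  induction ss generalizing us k with
  | nil => cases us <;> cases k <;> simp [maskBefore]
  | cons s ss ih =>
    cases us with
    | nil => simp at hu
    | cons u us =>
      cases k with
      | zero => simp at hu; simp [maskBefore, hu]
      | succ k => simpa [maskBefore] using ih us k (by simpa using hu)

theorem maskBefore_succ_false (ss : List Int) (us : List Bool) (k : Nat)
    (hk : k < ss.length) (hku : k < us.length) (hu : us.getD k false = false) :
    maskBefore ss us (k + 1) = maskBefore ss us k ++ [ss.getD k 0] := by
  induction ss generalizing us k with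
  | nil => simp at hk
  | cons s ss ih =>
    cases us with
    | nil => simp at hku
    | cons u us =>
      cases k with
      | zero => simp at hu; simp [maskBefore, hu]
      | succ k =>
        simp at hk hu hku
        simpa [maskBefore] using ih us k (by simpa using hk) (by simpa using hku) (by simpa using hu)

theorem maskFrom_set (ss : List Int) (us : List Bool) (k : Nat) :
    maskFrom ss (us.set k true) (k + 1) = maskFrom ss us (k + 1) := by
  induction ss generalizing us k with
  | nil => simp [maskFrom]
  | cons s ss ih =>
    cases us with
    | nil => simp [maskFrom]
    | cons u us =>
      cases k with
      | zero =>
        cases ss with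
        | nil => simp [maskFrom]
        | cons s' ss' => cases us <;> simp [maskFrom]
      | succ k =>
        cases ss with
        | nil => simp [maskFrom]
        | cons s' ss' =>
          cases us with
          | nil => simp [List.set, maskFrom]
          | cons u' us' => simpa [maskFrom, List.set] using ih (u' :: us') k

theorem maskBefore_set (ss : List Int) (us : List Bool) (k : Nat) :
    maskBefore ss (us.set k true) k = maskBefore ss us k := by
  induction ss generalizing us k with
  | nil => cases us <;> cases k <;> simp [maskBefore]
  | cons s ss ih =>
    cases us with
    | nil => cases k <;> simp [maskBefore]
    | cons u us =>
      cases k with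
      | zero => simp [maskBefore]
      | succ k => simpa [maskBefore, List.set] using ih us k

theorem maskBefore_getD_set (ss : List Int) (us : List Bool) (k : Nat)
    (hku : k < us.length) :
    maskBefore ss (us.set k true) (k + 1) = maskBefore ss us k := by
  rw [maskBefore_succ_true ss (us.set k true) k, maskBefore_set]
  simp [List.getD_eq_getElem?_getD, hku]

theorem maskFrom_all_false (ss : List Int) (us : List Bool)
    (hlen : ss.length ≤ us.length) (hf : ∀ u ∈ us, u = false) :
    maskFrom ss us 0 = ss := by
  induction ss generalizing us with
  | nil => cases us <;> simp [maskFrom]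
  | cons s ss ih =>
    cases us with
    | nil => simp at hlen
    | cons u us =>
      have hu : u = false := hf u (by simp)
      subst hu
      simp only [maskFrom, if_neg (by simp : ¬ (false : Bool) = true)]
      simp [ih us (by simpa using hlen) (fun v hv => hf v (by simp [hv]))]

theorem maskFrom_replicate (ss : List Int) :
    maskFrom ss (List.replicate ss.length false) 0 = ss :=
  maskFrom_all_false ss _ (by simp) (fun u hu => (List.mem_replicate.mp hu).2)

-- the simulation: A's (used, start) backtracking equals B's (skipped, rest) recursion
theorem canForm_eq_grow (sticks : List Int) (target : Int) (used : List Bool) (start : Nat)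
    (cur : Int) (num : Nat) (hlen : used.length = sticks.length) :
    canFormSticks sticks target used start cur num =
      if num = 0 then true
      else grow (maskBefore sticks used start) (maskFrom sticks used start) cur target (num - 1) := by
  revert hlen
  induction used, start, cur, num using canFormSticks.induct sticks target with
  | case1 used start cur => intro _; simp [canFormSticks]
  | case2 used start num hnum ih =>
    intro hlen
    rw [canFormSticks, if_neg hnum, if_pos rfl, ih hlen, if_neg hnum]
    conv_rhs => rw [grow.eq_def, if_pos rfl, canPack]
    by_cases h0 : num - 1 = 0
    · simp [h0]
    · rw [if_neg h0, if_neg h0]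
      congr 1
      · simp [maskBefore]
      · exact maskFrom_zero_split sticks used start
  | case3 used start cur num hnum hcur hlt hcond ih1 ih2 =>
    intro hlen
    obtain ⟨hu, hle⟩ : used.getD start false = false ∧ cur + sticks.getD start 0 ≤ target := by
      simpa using hcond
    have hku : start < used.length := hlen ▸ hlt
    rw [canFormSticks, if_neg hnum, if_neg hcur, dif_pos hlt, if_pos hcond, if_neg hnum,
      maskFrom_lt_false sticks used start hlt hku hu, grow, if_neg hcur]
    have e1 := ih1 (by simpa using hlen)
    rw [if_neg hnum] at e1
    have e2 := ih2 hlen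
    rw [if_neg hnum] at e2
    rw [e1, e2, maskFrom_set, maskBefore_getD_set sticks used start hku,
      maskBefore_succ_false sticks used start hlt hku hu]
    simp only [List.getD_eq_getElem?_getD] at hle ⊢
    cases hg : grow (maskBefore sticks used start) (maskFrom sticks used (start + 1))
        (cur + sticks[start]?.getD 0) target (num - 1)
    · simp [hle]
    · simp [hle]
  | case4 used start cur num hnum hcur hlt hcond ih =>
    intro hlen
    have hku : start < used.length := hlen ▸ hlt
    rw [canFormSticks, if_neg hnum, if_neg hcur, dif_pos hlt, if_neg hcond, if_neg hnum]
    have e := ih hlen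
    rw [if_neg hnum] at e
    rw [e]
    by_cases hu : used.getD start false = true
    · rw [maskFrom_lt_true sticks used start hu, maskBefore_succ_true sticks used start hu]
    · have hu' : used.getD start false = false := by simpa using hu
      have hle : ¬ cur + sticks.getD start 0 ≤ target := by
        intro h
        apply hcond
        simp only [Bool.and_eq_true, decide_eq_true_eq]
        exact ⟨hu', h⟩
      rw [maskFrom_lt_false sticks used start hlt hku hu', grow, if_neg hcur,
        maskBefore_succ_false sticks used start hlt hku hu']
      simp only [List.getD_eq_getElem?_getD] at hle ⊢
      simp [hle]
  | case5 used start cur num hnum hcur hge =>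
    intro hlen
    rw [canFormSticks, if_neg hnum, if_neg hcur, dif_neg hge, if_neg hnum,
      maskFrom_ge sticks used start (by omega), grow]
    simp [hcur]

theorem canForm_eq_canPack (sticks : List Int) (target : Int) (num : Nat) :
    canFormSticks sticks target (List.replicate sticks.length false) 0 0 num =
      canPack sticks target num := by
  rw [canForm_eq_grow sticks target _ 0 0 num (by simp), canPack]
  split
  · rfl
  · rw [maskFrom_replicate]
    congr 1
    cases sticks with
    | nil => simp [maskBefore]
    | cons s ss => simp [maskBefore]

theorem findLoop_eq (sticks : List Int) (total : Int) (L : Int) :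
    findLoopA sticks total L = findLoopB sticks total L := by
  induction L using findLoopA.induct sticks total with
  | case1 L hlt hm hc =>
    have hc' : canPack sticks L (PySem.Int.floordiv total L).toNat = true := by
      rw [← canForm_eq_canPack]; exact hc
    rw [findLoopA, findLoopB]
    simp [hlt, hm, hc, hc']
  | case2 L hlt hm hc ih =>
    have hc' : canPack sticks L (PySem.Int.floordiv total L).toNat = false := by
      rw [← canForm_eq_canPack]; simpa using hc
    rw [findLoopA, findLoopB]
    simp [hlt, hm, hc, hc', ih]
  | case3 L hlt hm ih =>
    rw [findLoopA, findLoopB]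
    simp [hlt, hm, ih]
  | case4 L hge =>
    rw [findLoopA, findLoopB]
    simp [hge]

-- ===== VERDICT (by name: the statement is the Claim_ definition above) =====
theorem find_min_original_length_spec : Claim_equal_find_min_original_length := by
  intro sticks _hdom _hpre
  unfold Spec_find_min_original_length find_min_original_length find_min_original_length_alt
  exact findLoop_eq _ _ _
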